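-- pv_equiv track=rewrite | github.com/MaximHirschmann/project-euler-solutions | 65.py | to_fraction
-- ===== SOURCE A (Python) =====
-- from math import gcd
--
-- def to_fraction(sequence):
--     last = [1, sequence[-1]]
--     sequence.pop(-1)
--     count = 0
--     for i in reversed(sequence):
--         last[0] = i * last[1] + last[0]
--         last[0], last[1] = last[1], last[0]
--         count += 1
--     divisor = 0
--     while divisor != 1:
--         divisor = gcd(last[0], last[1])
--         last = [last[0]//divisor, last[1]//divisor]
--
--     return  (last[1], last[0])
-- ===== SOURCE B (Python) =====
-- from math import gcd
--
-- def to_fraction(sequence):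
--     # Forward convergent recurrence (front-to-back) instead of A's backward fold.
--     # Preserves A's side effect of popping the last element of the argument.
--     h_prev2, h_prev1 = 0, 1
--     k_prev2, k_prev1 = 1, 0
--     for a in sequence:
--         h_prev2, h_prev1 = h_prev1, a * h_prev1 + h_prev2
--         k_prev2, k_prev1 = k_prev1, a * k_prev1 + k_prev2
--     sequence.pop(-1)
--     return (h_prev1, k_prev1)
-- ===== Notes on version B (the rewrite author's own statement) =====
-- stated objective: alternative
-- what changed: Replaces A's backward fold (pop last, iterate the reversed remainder mutating a two-cell list, then a gcd-reduction while-loop) with the standard forward convergent recurrence h=a*h1+h2, k=a*k1+k2 over the list front-to-back; the gcd loop disappears since consecutive convergents are coprime.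
import Mathlib
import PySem

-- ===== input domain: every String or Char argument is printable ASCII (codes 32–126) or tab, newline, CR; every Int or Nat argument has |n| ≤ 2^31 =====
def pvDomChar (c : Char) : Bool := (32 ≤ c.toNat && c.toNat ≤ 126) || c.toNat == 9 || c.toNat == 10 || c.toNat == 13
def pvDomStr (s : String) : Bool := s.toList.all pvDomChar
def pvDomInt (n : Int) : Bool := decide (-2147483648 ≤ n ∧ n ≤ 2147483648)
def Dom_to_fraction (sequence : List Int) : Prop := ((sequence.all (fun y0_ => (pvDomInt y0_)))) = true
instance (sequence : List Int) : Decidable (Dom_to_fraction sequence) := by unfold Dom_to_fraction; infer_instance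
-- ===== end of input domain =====

-- B replaces A's backward fold + gcd while-loop with the forward convergent recurrence
-- (alternative decomposition, same cost); equivalence of RETURN values is proved — both
-- Pythons additionally pop the last element of the argument in place.


-- ===== PORT A =====
-- the 'while divisor != 1' loop of A; it terminates in ≤ 2 rounds whenever gcd ≠ 0,
-- so a fuel of 3 is a pure totality guard (on every Pre_ input the gcd is already 1)
def pvGcdWhile : Nat → Int → Int → Int → Int × Int
  | 0, l0, l1, _ => (l0, l1)
  | Nat.succ f, l0, l1, divisor =>
    if divisor ≠ 1 then
      let d : Int := (Int.gcd l0 l1 : Int)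
      pvGcdWhile f (PySem.Int.floordiv l0 d) (PySem.Int.floordiv l1 d) d
    else (l0, l1)

def to_fraction (sequence : List Int) : Int × Int :=
  match PySem.List.pyGet? sequence (-1) with
  | none => (0, 0)   -- IndexError on the empty list; excluded by Pre_
  | some an =>
    -- sequence.pop(-1); for i in reversed(sequence): last[0]=i*last[1]+last[0]; swap
    let last := (sequence.dropLast).reverse.foldl
        (fun (l : Int × Int) i => (l.2, i * l.2 + l.1)) (1, an)
    let last := pvGcdWhile 3 last.1 last.2 0
    (last.2, last.1)

-- ===== PORT B =====
def to_fraction_alt (sequence : List Int) : Int × Int :=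
  let s := sequence.foldl
      (fun (s : Int × Int × Int × Int) a =>
        (s.2.1, a * s.2.1 + s.1, s.2.2.2, a * s.2.2.2 + s.2.2.1))
      (0, 1, 1, 0)
  (s.2.1, s.2.2.2)

-- ===== PRECONDITION & SPEC =====
-- Pre_ excludes only the empty list, on which both Pythons raise IndexError.
def Pre_to_fraction (sequence : List Int) : Prop := sequence ≠ []
instance (sequence : List Int) : Decidable (Pre_to_fraction sequence) := by unfold Pre_to_fraction; infer_instance
def pvWitness_to_fraction : List Int := [2, 1, 3]
def Spec_to_fraction (sequence : List Int) (out : Int × Int) : Prop := out = to_fraction_alt sequence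
instance (sequence : List Int) (out : Int × Int) : Decidable (Spec_to_fraction sequence out) := by unfold Spec_to_fraction; infer_instance

-- ===== CLAIM (what is proved, stated in full; the proofs are below) =====
def Claim_equal_to_fraction : Prop := ∀ (sequence : List Int), Dom_to_fraction sequence → Pre_to_fraction sequence → Spec_to_fraction sequence (to_fraction sequence)

-- ===== LEMMAS AND PROOFS =====

-- abbreviations for the two loop bodies (proof-side only)
def stepA (i : Int) (p : Int × Int) : Int × Int := (p.2, i * p.2 + p.1)
def stepB (s : Int × Int × Int × Int) (a : Int) : Int × Int × Int × Int :=
  (s.2.1, a * s.2.1 + s.1, s.2.2.2, a * s.2.2.2 + s.2.2.1)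

-- matrix identity: B's left fold (state · product of matrices) matched against A's right fold
lemma key (l : List Int) (p q : Int) :
    ∀ (h2 h1 k2 k1 : Int),
      (l.foldl stepB (h2, h1, k2, k1)).1 * p + (l.foldl stepB (h2, h1, k2, k1)).2.1 * q
        = h2 * (l.foldr stepA (p, q)).1 + h1 * (l.foldr stepA (p, q)).2
      ∧ (l.foldl stepB (h2, h1, k2, k1)).2.2.1 * p + (l.foldl stepB (h2, h1, k2, k1)).2.2.2 * q
        = k2 * (l.foldr stepA (p, q)).1 + k1 * (l.foldr stepA (p, q)).2 := by
  induction l with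
  | nil =>
    intro h2 h1 k2 k1
    constructor <;> simp only [List.foldr_nil, List.foldl_nil]
  | cons a t ih =>
    intro h2 h1 k2 k1
    have h := ih h1 (a * h1 + h2) k1 (a * k1 + k2)
    simp only [List.foldl_cons, List.foldr_cons, stepB, stepA] at *
    obtain ⟨h1', h2'⟩ := h
    exact ⟨by rw [h1']; ring, by rw [h2']; ring⟩

-- gcd invariant of A's loop: the pair stays coprime (seed (1, an))
lemma gcd_foldl (l : List Int) :
    ∀ (x y : Int), Int.gcd x y = 1 →
      Int.gcd (l.foldl (fun (l : Int × Int) i => (l.2, i * l.2 + l.1)) (x, y)).1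
              (l.foldl (fun (l : Int × Int) i => (l.2, i * l.2 + l.1)) (x, y)).2 = 1 := by
  induction l with
  | nil => intro x y h; simpa using h
  | cons a t ih =>
    intro x y h
    simp only [List.foldl_cons]
    apply ih
    have : Int.gcd y (a * y + x) = Int.gcd y x := by
      rw [mul_comm a y, add_comm, Int.gcd_add_mul_left_right]
    rw [this, Int.gcd_comm]; exact h

lemma pvGcdWhile_coprime (l0 l1 : Int) (h : Int.gcd l0 l1 = 1) :
    pvGcdWhile 3 l0 l1 0 = (l0, l1) := by
  simp [pvGcdWhile, h, PySem.Int.floordiv]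

theorem to_fraction_spec : Claim_equal_to_fraction := by
  intro sequence _ hpre
  unfold Spec_to_fraction to_fraction to_fraction_alt
  have hne : sequence ≠ [] := hpre
  have hget : PySem.List.pyGet? sequence (-1) = some (sequence.getLast hne) := by
    rw [PySem.List.pyGet?_neg_one, List.getLast?_eq_some_getLast]
  rw [hget]
  simp only []
  -- A's fold over the reversed dropLast, as a foldr over the whole list
  set an := sequence.getLast hne with han
  have hsplit : sequence = sequence.dropLast ++ [an] := (List.dropLast_append_getLast hne).symm
  have hrev : (sequence.dropLast).reverse.foldl
      (fun (l : Int × Int) i => (l.2, i * l.2 + l.1)) (1, an)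
      = sequence.foldr stepA ((0 : Int), (1 : Int)) := by
    rw [List.foldl_reverse]
    conv_rhs => rw [hsplit]
    have hseed : List.foldr stepA ((0 : Int), (1 : Int)) [an] = (1, an) := by
      simp [stepA]
    rw [List.foldr_append, hseed]
    rfl
  set V := sequence.foldr stepA ((0 : Int), (1 : Int)) with hV
  -- gcd of A's pair is 1, so the while loop is the identity
  have hg : Int.gcd V.1 V.2 = 1 := by
    rw [← hrev, List.foldl_reverse, ← List.foldl_reverse]
    exact gcd_foldl _ 1 an (by simp)
  rw [hrev, pvGcdWhile_coprime V.1 V.2 hg]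
  -- B's fold via the matrix identity
  have h := key sequence 0 1 0 1 1 0
  have hB1 : (sequence.foldl stepB (0, 1, 1, 0)).2.1 = V.2 := by
    have := h.1; simpa using this
  have hB2 : (sequence.foldl stepB (0, 1, 1, 0)).2.2.2 = V.1 := by
    have := h.2; simpa using this
  show (V.2, V.1) = _
  rw [show (fun (s : Int × Int × Int × Int) a =>
        (s.2.1, a * s.2.1 + s.1, s.2.2.2, a * s.2.2.2 + s.2.2.1)) = stepB from rfl]
  rw [hB1, hB2]
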